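-- pv_equiv track=rewrite | github.com/eth-siplab/contimask | rare_time_temp.py | get_explainers_sub
-- ===== SOURCE A (Python) =====
-- def get_explainers_sub(explainers: list, mask: list=None, pert: list=None, optim: list=None):
--
--     if mask is not None:
--         explainers = [ex for ex in explainers if ex.split('-')[0] in mask]
--     if pert is not None:
--         explainers = [ex for ex in explainers if ex.split('-')[1] in pert]
--     if optim is not None:
--         explainers = [ex for ex in explainers if ex.split('-')[2] in optim]
--
--     return explainers
-- ===== SOURCE B (Python) =====
-- def get_explainers_sub(explainers: list, mask: list=None, pert: list=None, optim: list=None):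
--     result = []
--     for ex in explainers:
--         parts = ex.split('-')
--         if (mask is None or parts[0] in mask) and \
--            (pert is None or parts[1] in pert) and \
--            (optim is None or parts[2] in optim):
--             result.append(ex)
--     return result
-- ===== Notes on version B (the rewrite author's own statement) =====
-- stated objective: simpler
-- what changed: B replaces A's three sequential list-rebuilding filter passes (one per criterion) by a single loop over explainers that splits each string once and tests the three criteria with short-circuiting in mask->pert->optim order.
import Mathlib
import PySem

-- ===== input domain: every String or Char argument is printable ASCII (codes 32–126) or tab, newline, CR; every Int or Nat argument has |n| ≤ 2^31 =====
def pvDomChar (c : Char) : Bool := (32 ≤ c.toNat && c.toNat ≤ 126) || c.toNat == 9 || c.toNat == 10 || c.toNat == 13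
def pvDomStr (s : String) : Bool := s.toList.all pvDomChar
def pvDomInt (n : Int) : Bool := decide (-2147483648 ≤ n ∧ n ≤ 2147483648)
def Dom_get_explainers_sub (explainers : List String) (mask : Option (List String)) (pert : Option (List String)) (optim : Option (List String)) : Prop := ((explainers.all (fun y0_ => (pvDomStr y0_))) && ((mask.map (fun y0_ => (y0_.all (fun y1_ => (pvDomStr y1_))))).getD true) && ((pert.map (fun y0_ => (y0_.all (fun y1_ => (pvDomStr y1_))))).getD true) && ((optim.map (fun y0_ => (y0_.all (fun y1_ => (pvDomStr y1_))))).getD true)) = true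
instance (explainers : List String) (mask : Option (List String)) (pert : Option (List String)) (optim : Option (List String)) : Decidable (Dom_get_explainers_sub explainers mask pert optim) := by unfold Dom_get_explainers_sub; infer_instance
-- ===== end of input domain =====

-- B change (one honest line): B replaces A's three sequential filter passes by a single
-- loop that splits each string once and tests mask→pert→optim with short-circuiting (simpler).

-- ===== PORT A =====
-- Three sequential filter passes, re-splitting the string in each pass, exactly as A.
-- Out-of-range parts[i] (IndexError in Python) is excluded by Pre_; getD "" is exact inside Pre_.
def get_explainers_sub (explainers : List String) (mask : Option (List String)) (pert : Option (List String)) (optim : Option (List String)) : List String :=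
  let e1 := match mask with
    | none => explainers
    | some m => explainers.filter (fun ex => m.contains ((((PySem.Str.split? ex "-").getD [])).getD 0 ""))
  let e2 := match pert with
    | none => e1
    | some p => e1.filter (fun ex => p.contains ((((PySem.Str.split? ex "-").getD [])).getD 1 ""))
  let e3 := match optim with
    | none => e2
    | some o => e2.filter (fun ex => o.contains ((((PySem.Str.split? ex "-").getD [])).getD 2 ""))
  e3

-- ===== PORT B =====
-- One pass: split once, test the three guards in order (Lean && short-circuits like Python and).
def get_explainers_sub_alt (explainers : List String) (mask : Option (List String)) (pert : Option (List String)) (optim : Option (List String)) : List String :=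
  explainers.filter (fun ex =>
    let parts := ((PySem.Str.split? ex "-").getD [])
    (match mask with | none => true | some m => m.contains (parts.getD 0 ""))
    && (match pert with | none => true | some p => p.contains (parts.getD 1 ""))
    && (match optim with | none => true | some o => o.contains (parts.getD 2 "")))

-- ===== PRECONDITION & SPEC =====
-- Pre_ excludes exactly the inputs where Python A raises IndexError: an element that
-- survives the earlier guards but whose '-'-split has too few parts for a requested index.
def Pre_get_explainers_sub (explainers : List String) (mask : Option (List String)) (pert : Option (List String)) (optim : Option (List String)) : Prop :=
  ∀ ex ∈ explainers,
    let parts := ((PySem.Str.split? ex "-").getD [])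
    let mok := match mask with | none => true | some m => m.contains (parts.getD 0 "")
    let pok := match pert with | none => true | some p => p.contains (parts.getD 1 "")
    (pert.isSome → mok = true → 2 ≤ parts.length) ∧
    (optim.isSome → mok = true → pok = true → 3 ≤ parts.length)
instance (explainers : List String) (mask : Option (List String)) (pert : Option (List String)) (optim : Option (List String)) : Decidable (Pre_get_explainers_sub explainers mask pert optim) := by unfold Pre_get_explainers_sub; infer_instance

def pvWitness_get_explainers_sub : List String × Option (List String) × Option (List String) × Option (List String) :=
  (["a-b-c", "x-b"], some ["a"], some ["b"], some ["c"])

def Spec_get_explainers_sub (explainers : List String) (mask : Option (List String)) (pert : Option (List String)) (optim : Option (List String)) (out : List String) : Prop := out = get_explainers_sub_alt explainers mask pert optim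
instance (explainers : List String) (mask : Option (List String)) (pert : Option (List String)) (optim : Option (List String)) (out : List String) : Decidable (Spec_get_explainers_sub explainers mask pert optim out) := by unfold Spec_get_explainers_sub; infer_instance

-- ===== CLAIM (what is proved, stated in full; the proofs are below) =====
def Claim_equal_get_explainers_sub : Prop := ∀ (explainers : List String) (mask : Option (List String)) (pert : Option (List String)) (optim : Option (List String)), Dom_get_explainers_sub explainers mask pert optim → Pre_get_explainers_sub explainers mask pert optim → Spec_get_explainers_sub explainers mask pert optim (get_explainers_sub explainers mask pert optim)

-- ===== LEMMAS AND PROOFS =====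
theorem pv_witness_ok :
    Dom_get_explainers_sub (pvWitness_get_explainers_sub.1) (pvWitness_get_explainers_sub.2.1) (pvWitness_get_explainers_sub.2.2.1) (pvWitness_get_explainers_sub.2.2.2) ∧
    Pre_get_explainers_sub (pvWitness_get_explainers_sub.1) (pvWitness_get_explainers_sub.2.1) (pvWitness_get_explainers_sub.2.2.1) (pvWitness_get_explainers_sub.2.2.2) := by
  decide

-- ===== VERDICT (by name: the statement is the Claim_ definition above) =====
theorem get_explainers_sub_spec : Claim_equal_get_explainers_sub := by
  intro explainers mask pert optim _ _
  unfold Spec_get_explainers_sub get_explainers_sub get_explainers_sub_alt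
  rcases mask with _ | m <;> rcases pert with _ | p <;> rcases optim with _ | o <;>
    simp [List.filter_filter, Bool.and_assoc, Bool.and_comm]
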